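-- pv_equiv track=rewrite | github.com/esadsumer/Author-Collaboration-Project | yazar iş birliği projesi/yazar_is_birligi_graf.py | find_similar_author
-- ===== SOURCE A (Python) =====
-- def normalize_author_name(name):
--     """Yazar adını normalize et (büyük/küçük harf, boşluklar)"""
--     return name.strip().lower()
--
-- def find_similar_author(author_name, existing_authors):
--     """Benzer yazar adı bul - daha sıkı kontrol"""
--     normalized_name = normalize_author_name(author_name)
--
--     # Tam eşleşme
--     for existing_name in existing_authors:
--         if normalize_author_name(existing_name) == normalized_name:
--             return existing_name
--
--     # Çok benzer eşleşme (sadece boşluk, noktalama farkı)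
--     for existing_name in existing_authors:
--         existing_norm = normalize_author_name(existing_name)
--         # Sadece boşluk ve noktalama farkı varsa
--         if existing_norm.replace(' ', '') == normalized_name.replace(' ', ''):
--             return existing_name
--
--     return None
-- ===== SOURCE B (Python) =====
-- def find_similar_author(author_name, existing_authors):
--     """Single pass: return first exact normalized match immediately;
--     remember the first space-stripped match as a fallback."""
--     target = author_name.strip().lower()
--     target_ns = target.replace(' ', '')
--     candidate = None
--     for existing_name in existing_authors:
--         norm = existing_name.strip().lower()
--         if norm == target:
--             return existing_name
--         if candidate is None and norm.replace(' ', '') == target_ns: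
--             candidate = existing_name
--     return candidate
-- ===== Notes on version B (the rewrite author's own statement) =====
-- stated objective: simpler
-- what changed: Replaces A's two sequential scans over existing_authors by one pass that returns on an exact normalized match and keeps a first-seen space-stripped candidate as fallback, normalizing each name once instead of once per loop.
import Mathlib
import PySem

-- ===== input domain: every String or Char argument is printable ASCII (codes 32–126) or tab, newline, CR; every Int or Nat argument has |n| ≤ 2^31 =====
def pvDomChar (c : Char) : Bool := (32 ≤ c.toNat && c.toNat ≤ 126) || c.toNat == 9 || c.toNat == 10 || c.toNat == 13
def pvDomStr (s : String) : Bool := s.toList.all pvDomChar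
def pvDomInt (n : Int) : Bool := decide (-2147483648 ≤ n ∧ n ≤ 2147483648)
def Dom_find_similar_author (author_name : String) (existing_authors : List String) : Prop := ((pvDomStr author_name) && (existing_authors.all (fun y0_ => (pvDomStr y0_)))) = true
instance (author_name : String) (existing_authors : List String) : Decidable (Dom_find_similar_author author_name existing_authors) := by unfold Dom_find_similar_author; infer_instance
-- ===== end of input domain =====

-- B replaces A's two sequential scans by one pass with an early return for exact
-- matches and a first-seen fallback candidate (objective: simpler).

-- ===== PORT A =====
def normalize_author_name (name : String) : String :=
  PySem.Str.lower (PySem.Str.strip name)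

-- first for-loop of A: return first exact normalized match
def pvLoopExact (normalized_name : String) : List String → Option String
  | [] => none
  | existing_name :: rest =>
      if normalize_author_name existing_name = normalized_name then some existing_name
      else pvLoopExact normalized_name rest

-- second for-loop of A: return first space-stripped match
def pvLoopSpace (normalized_name : String) : List String → Option String
  | [] => none
  | existing_name :: rest =>
      let existing_norm := normalize_author_name existing_name
      if PySem.Str.replace existing_norm " " "" = PySem.Str.replace normalized_name " " "" then
        some existing_name
      else pvLoopSpace normalized_name rest

def find_similar_author (author_name : String) (existing_authors : List String) : Option String :=
  let normalized_name := normalize_author_name author_name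
  match pvLoopExact normalized_name existing_authors with
  | some r => some r
  | none => pvLoopSpace normalized_name existing_authors

-- ===== PORT B =====
def pvLoopB (target target_ns : String) (candidate : Option String) : List String → Option String
  | [] => candidate
  | existing_name :: rest =>
      let norm := PySem.Str.lower (PySem.Str.strip existing_name)
      if norm = target then some existing_name
      else
        pvLoopB target target_ns
          (if candidate.isNone ∧ PySem.Str.replace norm " " "" = target_ns then some existing_name
           else candidate) rest

def find_similar_author_alt (author_name : String) (existing_authors : List String) : Option String :=
  let target := PySem.Str.lower (PySem.Str.strip author_name)
  let target_ns := PySem.Str.replace target " " ""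
  pvLoopB target target_ns none existing_authors

-- ===== PRECONDITION & SPEC =====
def Spec_find_similar_author (author_name : String) (existing_authors : List String) (out : Option String) : Prop := out = find_similar_author_alt author_name existing_authors
instance (author_name : String) (existing_authors : List String) (out : Option String) : Decidable (Spec_find_similar_author author_name existing_authors out) := by unfold Spec_find_similar_author; infer_instance

-- ===== CLAIM (what is proved, stated in full; the proofs are below) =====
def Claim_equal_find_similar_author : Prop := ∀ (author_name : String) (existing_authors : List String), Dom_find_similar_author author_name existing_authors → Spec_find_similar_author author_name existing_authors (find_similar_author author_name existing_authors)

-- ===== LEMMAS AND PROOFS =====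

-- one-pass loop with accumulator = exact scan, falling back to candidate-or-space scan
theorem pvLoopB_eq (target : String) (cand : Option String) (xs : List String) :
    pvLoopB target (PySem.Str.replace target " " "") cand xs =
      match pvLoopExact target xs with
      | some r => some r
      | none => match cand with
                | some c => some c
                | none => pvLoopSpace target xs := by
  induction xs generalizing cand with
  | nil => cases cand <;> simp [pvLoopB, pvLoopExact, pvLoopSpace]
  | cons e rest ih =>
      by_cases hx : normalize_author_name e = target
      · simp [pvLoopB, pvLoopExact, normalize_author_name] at *
        simp [hx]
      · simp only [pvLoopB, pvLoopExact, pvLoopSpace, normalize_author_name] at *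
        rw [if_neg hx, if_neg hx, ih]
        cases cand with
        | some c => simp
        | none =>
            by_cases hs : PySem.Str.replace (PySem.Str.lower (PySem.Str.strip e)) " " "" =
                PySem.Str.replace target " " ""
            · simp [hs]
            · simp [hs]

-- ===== VERDICT (by name: the statement is the Claim_ definition above) =====
theorem find_similar_author_spec : Claim_equal_find_similar_author := by
  intro author_name existing_authors _
  unfold Spec_find_similar_author find_similar_author find_similar_author_alt
  rw [pvLoopB_eq]
  simp [normalize_author_name]
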